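-- pv_equiv track=rewrite | github.com/marekpola/biblens-data-tools | src/build_recognition_languages.py | extract_book_core
-- ===== SOURCE A (Python) =====
-- def extract_book_core(regex_body: str) -> str | None:
--     escaped = False
--     start = None
--
--     i = 0
--     while i < len(regex_body):
--         ch = regex_body[i]
--
--         if escaped:
--             escaped = False
--             i += 1
--             continue
--
--         if ch == "\\":
--             escaped = True
--             i += 1
--             continue
--
--         if ch == "(":
--             next_char = regex_body[i + 1] if i + 1 < len(regex_body) else ""
--             if next_char != "?":
--                 start = i
--                 break
--
--         i += 1
--
--     if start is None:
--         return None
--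
--     depth = 0
--     escaped = False
--
--     for i in range(start, len(regex_body)):
--         ch = regex_body[i]
--
--         if escaped:
--             escaped = False
--             continue
--
--         if ch == "\\":
--             escaped = True
--             continue
--
--         if ch == "(":
--             depth += 1
--             continue
--
--         if ch == ")":
--             depth -= 1
--             if depth == 0:
--                 return regex_body[start + 1:i]
--
--     return None
-- ===== SOURCE B (Python) =====
-- def extract_book_core(regex_body: str) -> str | None:
--     # Pass 1: tokenize once — keep (index, char) for every character that is
--     # not a backslash escape and not itself escaped.
--     toks = []
--     esc = False
--     for i, ch in enumerate(regex_body):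
--         if esc:
--             esc = False
--         elif ch == "\\":
--             esc = True
--         else:
--             toks.append((i, ch))
--     # Pass 2: first capturing group = first effective '(' whose raw successor is not '?'.
--     for k, (i, ch) in enumerate(toks):
--         if ch == "(" and regex_body[i + 1:i + 2] != "?":
--             start = i
--             break
--     else:
--         return None
--     # Pass 3: find its matching ')' with an explicit paren stack over the remaining tokens.
--     stack = []
--     for i, ch in toks[k:]:
--         if ch == "(":
--             stack.append(i)
--         elif ch == ")":
--             if stack.pop() == start:
--                 return regex_body[start + 1:i]
--     return None
-- ===== Notes on version B (the rewrite author's own statement) =====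
-- stated objective: alternative
-- what changed: Replaced A's two escape-aware raw scans (find the group start by index, then rescan from it with a depth counter) by a tokenize-filter-match pipeline: one pass builds an (index, char) list of effective non-escaped characters, a find over those tokens picks the first capturing '(', and an explicit paren stack over the remaining tokens locates its matching ')'.
import Mathlib
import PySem

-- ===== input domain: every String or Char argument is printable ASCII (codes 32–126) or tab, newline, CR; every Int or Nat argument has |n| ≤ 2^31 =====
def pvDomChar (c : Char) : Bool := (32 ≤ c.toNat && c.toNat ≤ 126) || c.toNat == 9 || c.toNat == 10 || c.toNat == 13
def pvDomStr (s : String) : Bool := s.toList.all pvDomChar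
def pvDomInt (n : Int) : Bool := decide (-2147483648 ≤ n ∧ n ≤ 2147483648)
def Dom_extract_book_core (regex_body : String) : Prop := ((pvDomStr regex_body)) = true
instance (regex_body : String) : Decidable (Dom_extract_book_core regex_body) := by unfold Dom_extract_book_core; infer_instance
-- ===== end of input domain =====

-- B replaces A's two escape-aware raw scans with a tokenize-filter pass
-- (dropping escapes once), a find over tokens, and an explicit paren-stack match.

-- ===== PORT A =====
-- A's first while-loop: scan for the first unescaped '(' not followed by '?';
-- returns the break index together with the suffix of the text starting there.
def pvAFind : List Char → Nat → Bool → Option (Nat × List Char)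
  | [], _, _ => none
  | c :: rest, i, esc =>
    if esc then pvAFind rest (i + 1) false
    else if c = '\\' then pvAFind rest (i + 1) true
    else if c = '(' then
      if rest.head? = some '?' then pvAFind rest (i + 1) false
      else some (i, c :: rest)
    else pvAFind rest (i + 1) false

-- A's second for-loop over range(start, len): depth counting with escapes;
-- returns the index i at which depth returns to 0.
def pvAScan : List Char → Nat → Int → Bool → Option Nat
  | [], _, _, _ => none
  | c :: rest, i, depth, esc =>
    if esc then pvAScan rest (i + 1) depth false
    else if c = '\\' then pvAScan rest (i + 1) depth true
    else if c = '(' then pvAScan rest (i + 1) (depth + 1) false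
    else if c = ')' then
      if depth - 1 = 0 then some i
      else pvAScan rest (i + 1) (depth - 1) false
    else pvAScan rest (i + 1) depth false

def extract_book_core (regex_body : String) : Option String :=
  let cs := regex_body.toList
  match pvAFind cs 0 false with
  | none => none
  | some (start, suf) =>
    match pvAScan suf start 0 false with
    | none => none
    | some i => some (String.ofList (PySem.List.slice cs (some ((start : Int) + 1)) (some (i : Int))))

-- ===== PORT B =====
-- B pass 1: (index, char) tokens of the effective (non-escape) characters.
def pvToks : List Char → Nat → Bool → List (Nat × Char)
  | [], _, _ => []
  | c :: rest, i, esc =>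
    if esc then pvToks rest (i + 1) false
    else if c = '\\' then pvToks rest (i + 1) true
    else (i, c) :: pvToks rest (i + 1) false

-- B pass 2: first token that is '(' whose raw successor slice is not "?";
-- returns the token suffix from that token on (Python's toks[k:]).
def pvFindCap (full : List Char) : List (Nat × Char) → Option (List (Nat × Char))
  | [] => none
  | (i, ch) :: rest =>
    if ch = '(' ∧ PySem.List.slice full (some ((i : Int) + 1)) (some ((i : Int) + 2)) ≠ ['?'] then
      some ((i, ch) :: rest)
    else pvFindCap full rest

-- B pass 3: explicit paren stack; ')' pops, and popping the start index is the match.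
-- (the stack can never be empty at a pop in B's use; Python would raise there)
def pvMatch : List (Nat × Char) → Nat → List Nat → Option Nat
  | [], _, _ => none
  | (i, ch) :: rest, start, stack =>
    if ch = '(' then pvMatch rest start (i :: stack)
    else if ch = ')' then
      match stack with
      | [] => none
      | j :: s => if j = start then some i else pvMatch rest start s
    else pvMatch rest start stack

def extract_book_core_alt (regex_body : String) : Option String :=
  let cs := regex_body.toList
  match pvFindCap cs (pvToks cs 0 false) with
  | none => none
  | some ts =>
    match ts with
    | [] => none  -- unreachable: pvFindCap returns nonempty suffixes
    | (start, _) :: _ =>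
      match pvMatch ts start [] with
      | none => none
      | some i => some (String.ofList (PySem.List.slice cs (some ((start : Int) + 1)) (some (i : Int))))

-- ===== PRECONDITION & SPEC =====
def Spec_extract_book_core (regex_body : String) (out : Option String) : Prop := out = extract_book_core_alt regex_body
instance (regex_body : String) (out : Option String) : Decidable (Spec_extract_book_core regex_body out) := by unfold Spec_extract_book_core; infer_instance

-- ===== CLAIM (what is proved, stated in full; the proofs are below) =====
def Claim_equal_extract_book_core : Prop := ∀ (regex_body : String), Dom_extract_book_core regex_body → Spec_extract_book_core regex_body (extract_book_core regex_body)

-- ===== LEMMAS AND PROOFS =====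

-- drop through a cons suffix: full.drop (i+1) is the tail of the suffix at i.
theorem pvDropSucc (full : List Char) (i : Nat) (c : Char) (rest : List Char)
    (h : full.drop i = c :: rest) : full.drop (i + 1) = rest := by
  rw [← List.tail_drop, h]; rfl

-- The lookahead slice full[i+1:i+2] != "?" read through the suffix at position i.
theorem pvLookahead (full rest : List Char) (c : Char) (i : Nat)
    (h : full.drop i = c :: rest) :
    (PySem.List.slice full (some ((i : Int) + 1)) (some ((i : Int) + 2)) ≠ ['?'])
      ↔ ¬ (rest.head? = some '?') := by
  have h1 : ((i : Int) + 1) = ((i + 1 : Nat) : Int) := by push_cast; ring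
  have h2 : ((i : Int) + 2) = ((i + 2 : Nat) : Int) := by push_cast; ring
  rw [h1, h2, PySem.List.slice_toNat full (Int.natCast_nonneg _) (Int.natCast_nonneg _)]
  rw [Int.toNat_natCast, Int.toNat_natCast, pvDropSucc full i c rest h]
  have h3 : i + 2 - (i + 1) = 1 := by omega
  rw [h3]
  cases rest <;> simp

-- B's find over tokens = A's search loop, mapped to tokens of the found suffix.
theorem pvFind_eq (full : List Char) : ∀ (cs : List Char) (i : Nat) (esc : Bool),
    full.drop i = cs →
    pvFindCap full (pvToks cs i esc)
      = (pvAFind cs i esc).map (fun p => pvToks p.2 p.1 false) := by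
  intro cs
  induction cs with
  | nil => intro i esc h; simp [pvToks, pvAFind, pvFindCap]
  | cons c rest ih =>
    intro i esc h
    have hd : full.drop (i + 1) = rest := pvDropSucc full i c rest h
    by_cases h1 : esc
    · simp only [pvToks, pvAFind, if_pos h1]
      exact ih (i + 1) false hd
    · by_cases h2 : c = '\\'
      · simp only [pvToks, pvAFind, if_neg h1, if_pos h2]
        exact ih (i + 1) true hd
      · by_cases h3 : c = '('
        · by_cases hq : rest.head? = some '?'
          · have hc : ¬ (c = '(' ∧ PySem.List.slice full (some ((i : Int) + 1)) (some ((i : Int) + 2)) ≠ ['?']) := by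
              rintro ⟨-, hsl⟩
              exact ((pvLookahead full rest c i h).mp hsl) hq
            simp only [pvToks, pvAFind, if_neg h1, if_neg h2, if_pos h3, if_pos hq, pvFindCap,
              if_neg hc]
            exact ih (i + 1) false hd
          · have hc : (c = '(' ∧ PySem.List.slice full (some ((i : Int) + 1)) (some ((i : Int) + 2)) ≠ ['?']) :=
              ⟨h3, (pvLookahead full rest c i h).mpr hq⟩
            simp only [pvToks, pvAFind, if_neg h1, if_neg h2, if_pos h3, if_neg hq, pvFindCap,
              if_pos hc, Option.map_some]
            simp [h3]
        · simp only [pvToks, pvAFind, if_neg h1, if_neg h2, if_neg h3, pvFindCap]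
          rw [if_neg (by rintro ⟨hc, -⟩; exact h3 hc)]
          exact ih (i + 1) false hd

-- B's stack match over tokens = A's depth-counting scan, when the stack is
-- l ++ [start] with every element of l above start and the scan is past start.
theorem pvMatch_eq (start : Nat) : ∀ (cs : List Char) (i : Nat) (esc : Bool) (l : List Nat),
    start < i → (∀ j ∈ l, start < j) →
    pvMatch (pvToks cs i esc) start (l ++ [start]) = pvAScan cs i ((l.length : Int) + 1) esc := by
  intro cs
  induction cs with
  | nil => intro i esc l _ _; simp [pvToks, pvMatch, pvAScan]
  | cons c rest ih =>
    intro i esc l hi hl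
    by_cases h1 : esc
    · simp only [pvToks, pvAScan, if_pos h1]
      exact ih (i + 1) false l (by omega) hl
    · by_cases h2 : c = '\\'
      · simp only [pvToks, pvAScan, if_neg h1, if_pos h2]
        exact ih (i + 1) true l (by omega) hl
      · by_cases h3 : c = '('
        · simp only [pvToks, pvAScan, if_neg h1, if_neg h2, if_pos h3, pvMatch]
          have := ih (i + 1) false (i :: l) (by omega)
            (by intro j hj
                rcases List.mem_cons.mp hj with rfl | hj'
                · omega
                · exact hl j hj')
          rw [List.cons_append] at this
          rw [this, List.length_cons]
          push_cast; ring_nf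
        · by_cases h4 : c = ')'
          · simp only [pvToks, pvAScan, if_neg h1, if_neg h2, if_neg h3, if_pos h4, pvMatch]
            cases l with
            | nil => simp
            | cons j l' =>
              have hj : start < j := hl j (List.mem_cons_self ..)
              rw [List.cons_append]
              dsimp only
              rw [if_neg (by omega : ¬ j = start)]
              rw [if_neg (by simp only [List.length_cons]; push_cast; omega :
                ¬ (((j :: l').length : Int) + 1 - 1 = 0))]
              have := ih (i + 1) false l' (by omega) (fun k hk => hl k (List.mem_cons_of_mem _ hk))
              rw [this, List.length_cons]
              push_cast; ring_nf
          · simp only [pvToks, pvAScan, if_neg h1, if_neg h2, if_neg h3, if_neg h4, pvMatch]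
            exact ih (i + 1) false l (by omega) hl

-- A's search loop finds an unescaped '(' : the returned suffix starts with '('.
theorem pvAFind_head : ∀ (cs : List Char) (i : Nat) (esc : Bool) (st : Nat) (suf : List Char),
    pvAFind cs i esc = some (st, suf) → ∃ r, suf = '(' :: r := by
  intro cs
  induction cs with
  | nil => intro i esc st suf h; simp [pvAFind] at h
  | cons c rest ih =>
    intro i esc st suf h
    simp only [pvAFind] at h
    split_ifs at h with h1 h2 h3 h4
    · exact ih _ _ _ _ h
    · exact ih _ _ _ _ h
    · exact ih _ _ _ _ h
    · refine ⟨rest, ?_⟩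
      have := (Option.some.injEq _ _).mp h
      rw [← h3]
      exact (congrArg Prod.snd this).symm
    · exact ih _ _ _ _ h

-- ===== VERDICT (by name: the statement is the Claim_ definition above) =====
theorem extract_book_core_spec : Claim_equal_extract_book_core := by
  intro s _
  unfold Spec_extract_book_core extract_book_core extract_book_core_alt
  dsimp only
  rw [pvFind_eq s.toList s.toList 0 false (by simp)]
  cases hf : pvAFind s.toList 0 false with
  | none => simp
  | some p =>
    obtain ⟨st, suf⟩ := p
    obtain ⟨r, rfl⟩ := pvAFind_head s.toList 0 false st suf hf
    have htoks : pvToks ('(' :: r) st false = (st, '(') :: pvToks r (st + 1) false := by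
      simp [pvToks]
    simp only [Option.map_some, htoks]
    have hscan : pvAScan ('(' :: r) st 0 false = pvAScan r (st + 1) 1 false := by
      simp [pvAScan]
    have hmatch : pvMatch ((st, '(') :: pvToks r (st + 1) false) st [] = pvAScan r (st + 1) 1 false := by
      simp only [pvMatch]
      have := pvMatch_eq st r (st + 1) false [] (by omega) (by simp)
      simpa using this
    rw [hscan, hmatch]
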